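-- pv_equiv track=rewrite | github.com/joshhickson/streetwatch-chicago | src/location_enhancer.py | _normalize_street_name
-- ===== SOURCE A (Python) =====
-- def _normalize_street_name(street: str) -> str:
--     """Normalize street name by removing common suffixes for matching."""
--     street_lower = street.lower().strip()
--
--     # Remove common street type suffixes
--     suffixes = [
--         ' avenue', ' ave', ' street', ' st', ' road', ' rd',
--         ' boulevard', ' blvd', ' drive', ' dr', ' parkway', ' pkwy'
--     ]
--
--     for suffix in suffixes:
--         if street_lower.endswith(suffix):
--             return street_lower[:-len(suffix)].strip()
--
--     return street_lower
-- ===== SOURCE B (Python) =====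
-- _SUFFIXES = frozenset([
--     ' avenue', ' ave', ' street', ' st', ' road', ' rd',
--     ' boulevard', ' blvd', ' drive', ' dr', ' parkway', ' pkwy'
-- ])
--
--
-- def _normalize_street_name(street: str) -> str:
--     """Normalize street name by removing common suffixes for matching."""
--     street_lower = street.lower().strip()
--     i = street_lower.rfind(' ')
--     if i != -1 and street_lower[i:] in _SUFFIXES:
--         return street_lower[:i].strip()
--     return street_lower
-- ===== Notes on version B (the rewrite author's own statement) =====
-- stated objective: simpler
-- what changed: Replaces A's ordered scan over 12 endswith tests (each rescanning the string tail) by computing the last-space index once with rfind and doing a single frozenset lookup of the trailing chunk.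
import Mathlib
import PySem

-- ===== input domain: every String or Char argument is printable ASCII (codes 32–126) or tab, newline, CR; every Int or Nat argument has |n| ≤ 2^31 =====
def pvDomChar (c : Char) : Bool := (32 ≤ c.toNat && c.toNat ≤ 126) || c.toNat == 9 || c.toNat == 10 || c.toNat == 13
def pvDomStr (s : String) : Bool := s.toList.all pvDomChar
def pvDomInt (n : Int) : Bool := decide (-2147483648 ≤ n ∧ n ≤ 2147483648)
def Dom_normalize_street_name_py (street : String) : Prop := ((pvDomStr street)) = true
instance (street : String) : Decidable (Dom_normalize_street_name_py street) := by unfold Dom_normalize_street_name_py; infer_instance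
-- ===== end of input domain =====

-- B replaces A's ordered scan over 12 endswith-tests by one rfind(' ') plus a single
-- set lookup of the last space-delimited chunk (objective: simpler/idiomatic, same result).

-- ===== PORT A =====
-- the `for suffix in suffixes: if street_lower.endswith(suffix): return …` loop
def nsLoopA (street_lower : String) : List String → String
  | [] => street_lower
  | suffix :: rest =>
    if PySem.Str.endswith street_lower suffix = true then
      PySem.Str.strip (PySem.Str.slice street_lower none (some (-(PySem.Str.len suffix))))
    else nsLoopA street_lower rest

def normalize_street_name_py (street : String) : String :=
  let street_lower := PySem.Str.strip (PySem.Str.lower street)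
  nsLoopA street_lower
    [" avenue", " ave", " street", " st", " road", " rd",
     " boulevard", " blvd", " drive", " dr", " parkway", " pkwy"]

-- ===== PORT B =====
def pvSuffixSet : PySem.Set String :=
  PySem.Set.ofList
    [" avenue", " ave", " street", " st", " road", " rd",
     " boulevard", " blvd", " drive", " dr", " parkway", " pkwy"]

def normalize_street_name_py_alt (street : String) : String :=
  let street_lower := PySem.Str.strip (PySem.Str.lower street)
  let i := PySem.Str.rfind street_lower " "
  if i ≠ -1 ∧ List.contains pvSuffixSet (PySem.Str.slice street_lower (some i) none) = true then
    PySem.Str.strip (PySem.Str.slice street_lower none (some i))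
  else street_lower

-- ===== PRECONDITION & SPEC =====
def Spec_normalize_street_name_py (street : String) (out : String) : Prop := out = normalize_street_name_py_alt street
instance (street : String) (out : String) : Decidable (Spec_normalize_street_name_py street out) := by unfold Spec_normalize_street_name_py; infer_instance

-- ===== CLAIM (what is proved, stated in full; the proofs are below) =====
def Claim_equal_normalize_street_name_py : Prop := ∀ (street : String), Dom_normalize_street_name_py street → Spec_normalize_street_name_py street (normalize_street_name_py street)

-- ===== LEMMAS AND PROOFS =====

-- decompose a list at its LAST space
lemma pv_last_space_split (l : List Char) (h : ' ' ∈ l) :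
    ∃ pre tail, l = pre ++ ' ' :: tail ∧ ' ' ∉ tail := by
  induction l with
  | nil => simp at h
  | cons x xs ih =>
    by_cases hx : ' ' ∈ xs
    · obtain ⟨p, t, rfl, ht⟩ := ih hx
      exact ⟨x :: p, t, rfl, ht⟩
    · have hx' : x = ' ' := by
        rcases List.mem_cons.mp h with h' | h'
        · exact h'.symm
        · exact absurd h' hx
      exact ⟨[], xs, by simp [hx'], hx⟩

lemma pv_prefix_singleton (l : List Char) (c : Char) :
    [c].isPrefixOf l = true ↔ l[0]? = some c := by
  cases l with
  | nil => simp [List.isPrefixOf]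
  | cons a l =>
    simp [List.isPrefixOf]
    exact eq_comm

-- rfind.go returns p when cs[p] = ' ' and no later index ≤ k holds a space
lemma pv_go_eq (cs : List Char) (p : Nat) (hp : cs[p]? = some ' ') :
    ∀ k, p ≤ k → (∀ m, p < m → m ≤ k → cs[m]? ≠ some ' ') →
      PySem.Chars.rfind.go cs [' '] k = (p : Int) := by
  intro k
  induction k with
  | zero =>
    intro hk _
    have hp0 : p = 0 := Nat.le_zero.mp hk
    subst hp0
    rw [PySem.Chars.rfind.go, if_pos ((pv_prefix_singleton cs ' ').mpr hp)]
    simp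
  | succ j ih =>
    intro hk hno
    rw [PySem.Chars.rfind.go]
    by_cases hpj : p = j + 1
    · subst hpj
      rw [if_pos (by
        rw [pv_prefix_singleton, List.getElem?_drop]
        simpa [Nat.add_comm] using hp)]
    · have hple : p ≤ j := by omega
      have hns : cs[j + 1]? ≠ some ' ' := hno (j + 1) (by omega) (le_refl _)
      rw [if_neg (by
        rw [pv_prefix_singleton, List.getElem?_drop]
        simpa [Nat.add_comm] using hns)]
      exact ih hple (fun m h1 h2 => hno m h1 (by omega))

lemma pv_go_neg (cs : List Char) (h : ' ' ∉ cs) :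
    ∀ k, PySem.Chars.rfind.go cs [' '] k = -1 := by
  have hno : ∀ m : Nat, cs[m]? ≠ some ' ' := by
    intro m hm
    exact h (List.mem_of_getElem? hm)
  intro k
  induction k with
  | zero =>
    rw [PySem.Chars.rfind.go, if_neg (by
      rw [pv_prefix_singleton]
      simpa using hno 0)]
  | succ j ih =>
    rw [PySem.Chars.rfind.go, if_neg (by
      rw [pv_prefix_singleton, List.getElem?_drop]
      simpa using hno (j + 1))]
    exact ih

lemma pv_rfind_nospace (cs : List Char) (h : ' ' ∉ cs) :
    PySem.Chars.rfind cs [' '] = -1 := pv_go_neg cs h _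

lemma pv_rfind_split (pre tail : List Char) (h : ' ' ∉ tail) :
    PySem.Chars.rfind (pre ++ ' ' :: tail) [' '] = (pre.length : Int) := by
  show PySem.Chars.rfind.go _ _ _ = _
  apply pv_go_eq
  · simp
  · simp
  · intro m h1 h2 hm
    have hlen : (pre ++ ' ' :: tail).length = pre.length + tail.length + 1 := by simp; omega
    by_cases hm2 : m < (pre ++ ' ' :: tail).length
    · have : (pre ++ ' ' :: tail)[m]? = tail[m - pre.length - 1]? := by
        rw [List.getElem?_append_right (by omega)]
        have hms : m - pre.length = (m - pre.length - 1) + 1 := by omega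
        rw [hms, List.getElem?_cons_succ]
        simp
      rw [this] at hm
      exact h (List.mem_of_getElem? hm)
    · rw [List.getElem?_eq_none (by omega)] at hm
      simp at hm

lemma pv_endswith_split (pre tail w : List Char) (ht : ' ' ∉ tail) (hw : ' ' ∉ w) :
    PySem.Chars.endswith (pre ++ ' ' :: tail) (' ' :: w) = true ↔ w = tail := by
  rw [PySem.Chars.endswith_iff]
  constructor
  · intro hs
    have hts : (' ' :: tail) <:+ (pre ++ ' ' :: tail) := ⟨pre, rfl⟩
    by_cases hle : (' ' :: w).length ≤ (' ' :: tail).length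
    · rcases List.suffix_of_suffix_length_le hs hts hle with ⟨t, heq⟩
      cases t with
      | nil =>
        simpa using heq
      | cons a t' =>
        simp only [List.cons_append, List.cons.injEq] at heq
        exact absurd (by rw [← heq.2]; simp) ht
    · rcases List.suffix_of_suffix_length_le hts hs (by simp at hle ⊢; omega) with ⟨t, heq⟩
      cases t with
      | nil =>
        have := congrArg List.length heq
        simp at this hle
        omega
      | cons a t' =>
        simp only [List.cons_append, List.cons.injEq] at heq
        exact absurd (by rw [← heq.2]; simp) hw
  · rintro rfl
    exact ⟨pre, rfl⟩

lemma pv_endswith_nospace (cs w : List Char) (h : ' ' ∉ cs) :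
    PySem.Chars.endswith cs (' ' :: w) = false := by
  rw [Bool.eq_false_iff]
  intro hc
  rcases (PySem.Chars.endswith_iff _ _).mp hc with ⟨t, ht⟩
  exact h (by rw [← ht]; simp)

lemma pv_slice_neg {α : Type} (xs : List α) (b : Int) (hb : b < 0) (h : 0 ≤ b + xs.length) :
    PySem.List.slice xs none (some b) = xs.take (b + xs.length).toNat := by
  simp only [PySem.List.slice, PySem.List.clampIdx]
  rw [if_pos hb, if_neg (by omega)]
  simp
  congr 1
  omega

lemma pv_loopA_nospace (sl : String) (h : ' ' ∉ sl.toList) (sufs : List String)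
    (hw : ∀ su ∈ sufs, ∃ w, su.toList = ' ' :: w) : nsLoopA sl sufs = sl := by
  induction sufs with
  | nil => rfl
  | cons su rest ih =>
    obtain ⟨w, hsu⟩ := hw su (by simp)
    rw [nsLoopA, PySem.Str.endswith_eq, hsu, pv_endswith_nospace _ _ h]
    exact ih (fun s hs => hw s (by simp [hs]))

lemma pv_loopA_split (sl : String) (pre tail : List Char)
    (hs : sl.toList = pre ++ ' ' :: tail) (ht : ' ' ∉ tail)
    (sufs : List String) (hw : ∀ su ∈ sufs, ∃ w, su.toList = ' ' :: w ∧ ' ' ∉ w) :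
    nsLoopA sl sufs =
      if sufs.any (fun su => su.toList == ' ' :: tail) then
        PySem.Str.strip (PySem.Str.slice sl none (some (pre.length : Int)))
      else sl := by
  induction sufs with
  | nil => rfl
  | cons su rest ih =>
    obtain ⟨w, hsu, hwns⟩ := hw su (by simp)
    rw [nsLoopA, PySem.Str.endswith_eq, hs, hsu]
    by_cases hwt : w = tail
    · subst hwt
      rw [if_pos ((pv_endswith_split pre w w ht hwns).mpr rfl)]
      have hcond : ((su :: rest).any fun su => su.toList == ' ' :: w) = true := by
        simp [List.any_cons, hsu]
      rw [hcond, if_pos rfl]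
      congr 1
      apply String.toList_inj.mp
      rw [PySem.Str.toList_slice, PySem.Str.toList_slice]
      show PySem.List.slice sl.toList none _ = PySem.List.slice sl.toList none _
      have hlen : PySem.Str.len su = 1 + (w.length : Int) := by
        rw [PySem.Str.len_eq, hsu]; simp; omega
      have hcs : (sl.toList.length : Int) = pre.length + 1 + w.length := by
        rw [hs]; simp; omega
      rw [pv_slice_neg _ _ (by omega) (by omega),
          PySem.List.slice_to _ (by positivity)]
      congr 1
      omega
    · rw [if_neg (by simp [pv_endswith_split pre tail w ht hwns, hwt])]
      rw [ih (fun s hs => hw s (by simp [hs]))]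
      have : (su.toList == ' ' :: tail) = false := by
        simp [hsu, hwt]
      simp [List.any_cons, this]

-- every literal suffix is ' ' followed by a space-free word
lemma pv_sufs_shape :
    ∀ su ∈ ([" avenue", " ave", " street", " st", " road", " rd",
             " boulevard", " blvd", " drive", " dr", " parkway", " pkwy"] : List String),
      ∃ w, su.toList = ' ' :: w ∧ ' ' ∉ w := by
  intro su hsu
  fin_cases hsu
  · exact ⟨['a','v','e','n','u','e'], by decide, by decide⟩
  · exact ⟨['a','v','e'], by decide, by decide⟩
  · exact ⟨['s','t','r','e','e','t'], by decide, by decide⟩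
  · exact ⟨['s','t'], by decide, by decide⟩
  · exact ⟨['r','o','a','d'], by decide, by decide⟩
  · exact ⟨['r','d'], by decide, by decide⟩
  · exact ⟨['b','o','u','l','e','v','a','r','d'], by decide, by decide⟩
  · exact ⟨['b','l','v','d'], by decide, by decide⟩
  · exact ⟨['d','r','i','v','e'], by decide, by decide⟩
  · exact ⟨['d','r'], by decide, by decide⟩
  · exact ⟨['p','a','r','k','w','a','y'], by decide, by decide⟩
  · exact ⟨['p','k','w','y'], by decide, by decide⟩

-- ===== VERDICT (by name: the statement is the Claim_ definition above) =====
theorem normalize_street_name_py_spec : Claim_equal_normalize_street_name_py := by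
  intro street _
  show normalize_street_name_py street = normalize_street_name_py_alt street
  rw [normalize_street_name_py, normalize_street_name_py_alt]
  set sl := PySem.Str.strip (PySem.Str.lower street) with hsl
  have hspace : (" " : String).toList = [' '] := by decide
  by_cases hsp : ' ' ∈ sl.toList
  · obtain ⟨pre, tail, hdec, ht⟩ := pv_last_space_split _ hsp
    rw [pv_loopA_split sl pre tail hdec ht _ pv_sufs_shape]
    have hrf : PySem.Str.rfind sl " " = (pre.length : Int) := by
      rw [PySem.Str.rfind_eq, hspace, hdec, pv_rfind_split pre tail ht]
    rw [hrf]
    have hx : (PySem.Str.slice sl (some (pre.length : Int)) none).toList = ' ' :: tail := by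
      rw [PySem.Str.toList_slice]
      show PySem.List.slice sl.toList _ none = _
      rw [PySem.List.slice_from _ (by positivity)]
      rw [hdec]
      simp
    have hkey : ∀ su : String,
        ((PySem.Str.slice sl (some (pre.length : Int)) none) == su)
          = (su.toList == ' ' :: tail) := by
      intro su
      rw [← hx, Bool.eq_iff_iff]
      simp only [beq_iff_eq, String.toList_inj]
      exact eq_comm
    have hcont : List.contains pvSuffixSet (PySem.Str.slice sl (some (pre.length : Int)) none)
        = (([" avenue", " ave", " street", " st", " road", " rd",
             " boulevard", " blvd", " drive", " dr", " parkway", " pkwy"] : List String).any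
            fun su => su.toList == ' ' :: tail) := by
      have hset : pvSuffixSet =
          ([" avenue", " ave", " street", " st", " road", " rd",
            " boulevard", " blvd", " drive", " dr", " parkway", " pkwy"] : List String) := by decide
      rw [hset, List.contains_eq_any_beq]
      simp only [List.any_cons, List.any_nil, hkey]
    rw [hcont]
    by_cases hany : (([" avenue", " ave", " street", " st", " road", " rd",
             " boulevard", " blvd", " drive", " dr", " parkway", " pkwy"] : List String).any
            fun su => su.toList == ' ' :: tail) = true
    · rw [if_pos hany, if_pos ⟨by omega, hany⟩]
    · rw [if_neg hany, if_neg (by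
        intro hcond
        exact hany hcond.2)]
  · rw [pv_loopA_nospace sl hsp _ (fun su h => ⟨(pv_sufs_shape su h).choose, (pv_sufs_shape su h).choose_spec.1⟩)]
    have hrf : PySem.Str.rfind sl " " = -1 := by
      rw [PySem.Str.rfind_eq, hspace, pv_rfind_nospace _ hsp]
    rw [hrf, if_neg (by intro hcond; exact hcond.1 rfl)]
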